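-- pv_equiv track=rewrite | github.com/brilliantlee2/Strint3 | scripts/cluster_umis_allbam.py | get_connected_components_adjacency
-- ===== SOURCE A (Python) =====
-- def breadth_first_search(node, adj_list):
--     searched = set()
--     queue = set()
--     queue.update((node,))
--     searched.update((node,))
--
--     while len(queue) > 0:
--         node = queue.pop()
--         for next_node in adj_list[node]:
--             if next_node not in searched:
--                 queue.update((next_node,))
--                 searched.update((next_node,))
--
--     return searched
--
-- def get_connected_components_adjacency(umis, graph, counts):
--     found = set()
--     components = []
--
--     for node in sorted(graph, key=lambda x: counts[x], reverse=True):
--         if node not in found: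
--             component = breadth_first_search(node, graph)
--             found.update(component)
--             components.append(component)
--
--     return components
-- ===== SOURCE B (Python) =====
-- def get_connected_components_adjacency(umis, graph, counts):
--     # Stage 1: all-pairs reachability closure by monotone fixpoint iteration
--     # (relaxation sweeps: reach[u] absorbs reach[v] for each edge u->v, until
--     # no set grows), instead of a per-start breadth-first search.
--     reach = {u: {u} for u in graph}
--     while True:
--         new = {u: reach[u] | {w for v in graph[u] for w in reach[v]}
--                for u in graph}
--         if all(len(new[u]) == len(reach[u]) for u in graph):
--             break
--         reach = new
--     # Stage 2: one pass over the nodes in decreasing-count order, emitting the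
--     # precomputed closure of each node not swallowed by an earlier component.
--     found = set()
--     components = []
--     for node in sorted(graph, key=lambda x: counts[x], reverse=True):
--         if node not in found:
--             found |= reach[node]
--             components.append(reach[node])
--     return components
-- ===== Notes on version B (the rewrite author's own statement) =====
-- stated objective: alternative
-- what changed: B replaces A's per-start breadth-first search with a two-stage algorithm: an all-pairs reachability closure computed by monotone fixpoint relaxation sweeps over the adjacency lists, then a single pass over the count-sorted nodes emitting the precomputed closure of each node not already absorbed.
import Mathlib
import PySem

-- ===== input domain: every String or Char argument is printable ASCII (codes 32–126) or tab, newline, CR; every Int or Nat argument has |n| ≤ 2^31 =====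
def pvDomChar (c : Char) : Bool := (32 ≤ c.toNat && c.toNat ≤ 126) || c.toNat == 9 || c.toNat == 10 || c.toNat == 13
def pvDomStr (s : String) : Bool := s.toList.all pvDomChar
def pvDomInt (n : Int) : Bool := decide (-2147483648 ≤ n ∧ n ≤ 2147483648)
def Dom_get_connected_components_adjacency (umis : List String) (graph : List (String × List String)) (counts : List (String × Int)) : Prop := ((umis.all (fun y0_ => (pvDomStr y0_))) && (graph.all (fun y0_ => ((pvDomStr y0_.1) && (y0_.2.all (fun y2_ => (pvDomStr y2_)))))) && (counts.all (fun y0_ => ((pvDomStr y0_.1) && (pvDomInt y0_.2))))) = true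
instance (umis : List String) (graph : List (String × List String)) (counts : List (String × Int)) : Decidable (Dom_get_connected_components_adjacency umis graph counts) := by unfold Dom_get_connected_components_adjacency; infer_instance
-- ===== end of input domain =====

-- B replaces A's per-start breadth-first search by a two-stage algorithm: an all-pairs reachability
-- closure computed by monotone fixpoint relaxation sweeps, then one pass over the count-sorted nodes
-- emitting precomputed closures; objective: alternative (not claimed faster).  Python A returns a
-- list of SETS whose internal (hash) iteration order is not modelled: both ports render each
-- returned set canonically as the list of its members in graph-key insertion order (the SET of
-- members is what is compared and proved equal; A's BFS and B's sweeps themselves stay literal).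

-- ===== PORT A =====
-- inner 'for next_node in adj_list[node]' loop of breadth_first_search: state = (queue, searched)
def pvStepA (p : PySem.Set String × PySem.Set String) (nb : String) : PySem.Set String × PySem.Set String :=
  if nb ∈ p.2 then p else (PySem.Set.add p.1 nb, PySem.Set.add p.2 nb)

-- 'while len(queue) > 0' loop; fuel makes it total (queue.pop() takes the first queued element)
def pvBFSA (g : PySem.Dict String (List String)) : Nat → PySem.Set String → PySem.Set String → PySem.Set String
  | 0, _, searched => searched
  | _ + 1, [], searched => searched
  | fuel + 1, node :: rest, searched =>
      let st := (g.getD node []).foldl pvStepA (rest, searched)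
      pvBFSA g fuel st.1 st.2

-- canonical rendering of a returned Python set: its members in graph-key insertion order
def pvCanon (K : List String) (s : List String) : List String :=
  K.filter (fun k => decide (k ∈ s))

def get_connected_components_adjacency (umis : List String) (graph : List (String × List String)) (counts : List (String × Int)) : List (List String) :=
  let g := PySem.Dict.ofList graph
  let c := PySem.Dict.ofList counts
  (PySem.List.sorted g.keys (fun x => c.getD x 0) true).foldl
    (fun (st : PySem.Set String × List (List String)) node =>
      if node ∈ st.1 then st
      else
        let component := pvBFSA g (graph.length + 1) [node] [node]
        (PySem.Set.update st.1 component, st.2 ++ [pvCanon g.keys component]))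
    ([], []) |>.2

-- ===== PORT B =====
-- one relaxation sweep: new[u] = reach[u] | {w for v in graph[u] for w in reach[v]}, for u over the keys
def pvSweepB (g : PySem.Dict String (List String)) (K : List String) (reach : PySem.Dict String (PySem.Set String)) : PySem.Dict String (PySem.Set String) :=
  PySem.Dict.mk (K.map (fun u =>
    (u, PySem.Set.union (reach.getD u []) ((g.getD u []).flatMap (fun v => reach.getD v [])))))

-- 'while True: new = …; if all(len(new[u]) == len(reach[u]) for u in graph): break; reach = new'
-- (fuel makes it total; inside Pre_ the sweeps are monotone and bounded, so the fuel suffices)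
def pvIterB (g : PySem.Dict String (List String)) (K : List String) : Nat → PySem.Dict String (PySem.Set String) → PySem.Dict String (PySem.Set String)
  | 0, reach => reach
  | fuel + 1, reach =>
      let new := pvSweepB g K reach
      if K.all (fun u => (new.getD u []).length == (reach.getD u []).length) then reach
      else pvIterB g K fuel new

def get_connected_components_adjacency_alt (umis : List String) (graph : List (String × List String)) (counts : List (String × Int)) : List (List String) :=
  let g := PySem.Dict.ofList graph
  let c := PySem.Dict.ofList counts
  let reach := pvIterB g g.keys (graph.length * graph.length + 1)
    (PySem.Dict.mk (g.keys.map (fun u => (u, [u]))))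
  (PySem.List.sorted g.keys (fun x => c.getD x 0) true).foldl
    (fun (st : PySem.Set String × List (List String)) node =>
      if node ∈ st.1 then st
      else (PySem.Set.union st.1 (reach.getD node []), st.2 ++ [pvCanon g.keys (reach.getD node [])]))
    ([], []) |>.2

-- ===== PRECONDITION & SPEC =====
-- Pre_ excludes exactly the inputs where Python A raises KeyError: a key of the graph dict missing
-- from counts (the sort key counts[x]), or an adjacency-list entry of the graph dict that is not
-- itself a graph key (every reached node's adjacency is dereferenced).  Stated over the dict's
-- surviving items so that duplicate keys in the association list do not narrow it.
def Pre_get_connected_components_adjacency (umis : List String) (graph : List (String × List String)) (counts : List (String × Int)) : Prop :=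
  ∀ p ∈ (PySem.Dict.ofList graph).items, p.1 ∈ counts.map Prod.fst ∧ ∀ v ∈ p.2, v ∈ graph.map Prod.fst
instance (umis : List String) (graph : List (String × List String)) (counts : List (String × Int)) : Decidable (Pre_get_connected_components_adjacency umis graph counts) := by unfold Pre_get_connected_components_adjacency; infer_instance

def pvWitness_get_connected_components_adjacency : List String × (List (String × List String)) × (List (String × Int)) :=
  (["a"], [("a", ["b"]), ("b", ["a", "c"]), ("c", [])], [("a", 2), ("b", 1), ("c", 3)])

def Spec_get_connected_components_adjacency (umis : List String) (graph : List (String × List String)) (counts : List (String × Int)) (out : List (List String)) : Prop := out = get_connected_components_adjacency_alt umis graph counts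
instance (umis : List String) (graph : List (String × List String)) (counts : List (String × Int)) (out : List (List String)) : Decidable (Spec_get_connected_components_adjacency umis graph counts out) := by unfold Spec_get_connected_components_adjacency; infer_instance

-- ===== CLAIM (what is proved, stated in full; the proofs are below) =====
def Claim_equal_get_connected_components_adjacency : Prop := ∀ (umis : List String) (graph : List (String × List String)) (counts : List (String × Int)), Dom_get_connected_components_adjacency umis graph counts → Pre_get_connected_components_adjacency umis graph counts → Spec_get_connected_components_adjacency umis graph counts (get_connected_components_adjacency umis graph counts)

-- ===== LEMMAS AND PROOFS =====

-- the edge relation of the graph dict and reachability along it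
def pvE (g : PySem.Dict String (List String)) (u v : String) : Prop := v ∈ g.getD u []

-- loop invariant of B's fixpoint iteration: every closure entry is sound, owns its key, stays in K
def pvInvB (g : PySem.Dict String (List String)) (K : List String) (R : PySem.Dict String (PySem.Set String)) : Prop :=
  ∀ u ∈ K, (R.getD u []).Nodup ∧ u ∈ R.getD u [] ∧
    ∀ x ∈ R.getD u [], x ∈ K ∧ Relation.ReflTransGen (pvE g) u x

-- the fixpoint property B's stopping test certifies: each entry absorbs its successors' entries
def pvFixB (g : PySem.Dict String (List String)) (K : List String) (R : PySem.Dict String (PySem.Set String)) : Prop :=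
  ∀ u ∈ K, ∀ v ∈ g.getD u [], ∀ x ∈ R.getD v [], x ∈ R.getD u []

lemma pv_sub_len {s K : List String} (hn : s.Nodup) (hs : ∀ x ∈ s, x ∈ K) : s.length ≤ K.length :=
  (List.subperm_of_subset hn hs).length_le

-- A's inner neighbour fold appends exactly the unseen neighbours to queue and searched alike
lemma pv_stepA_fold (l : List String) : ∀ (q s : List String), (∀ x ∈ q, x ∈ s) → s.Nodup →
    ∃ d : List String,
      l.foldl pvStepA (q, s) = (q ++ d, s ++ d) ∧
      (∀ x ∈ d, x ∈ l ∧ x ∉ s) ∧ (∀ x ∈ l, x ∈ s ++ d) ∧ (s ++ d).Nodup := by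
  induction l with
  | nil =>
      intro q s _ hn
      exact ⟨[], by simp, by simp, by simp, by simpa using hn⟩
  | cons nb t ih =>
      intro q s hqs hn
      simp only [List.foldl_cons]
      by_cases h : nb ∈ s
      · have hstep : pvStepA (q, s) nb = (q, s) := by simp [pvStepA, h]
        rw [hstep]
        obtain ⟨d, h1, h2, h3, h4⟩ := ih q s hqs hn
        exact ⟨d, h1, fun x hx => ⟨List.mem_cons_of_mem _ (h2 x hx).1, (h2 x hx).2⟩,
          fun x hx => by
            rcases List.mem_cons.mp hx with rfl | hx
            · exact List.mem_append.mpr (Or.inl h)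
            · exact h3 x hx, h4⟩
      · have hnq : nb ∉ q := fun hq => h (hqs nb hq)
        have hstep : pvStepA (q, s) nb = (q ++ [nb], s ++ [nb]) := by
          simp [pvStepA, h, PySem.Set.add_of_not_mem hnq]
        rw [hstep]
        have hn' : (s ++ [nb]).Nodup := by
          rw [List.nodup_append]
          exact ⟨hn, List.nodup_singleton _, fun a ha b hb hab => h ((List.mem_singleton.mp hb ▸ hab) ▸ ha)⟩
        have hqs' : ∀ x ∈ q ++ [nb], x ∈ s ++ [nb] := by
          intro x hx
          rcases List.mem_append.mp hx with hx | hx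
          · exact List.mem_append.mpr (Or.inl (hqs x hx))
          · exact List.mem_append.mpr (Or.inr hx)
        obtain ⟨d, h1, h2, h3, h4⟩ := ih (q ++ [nb]) (s ++ [nb]) hqs' hn'
        refine ⟨nb :: d, ?_, ?_, ?_, ?_⟩
        · rw [h1]; simp
        · intro x hx
          rcases List.mem_cons.mp hx with rfl | hx
          · exact ⟨List.mem_cons_self, h⟩
          · refine ⟨List.mem_cons_of_mem _ (h2 x hx).1, fun hxs => (h2 x hx).2 (List.mem_append.mpr (Or.inl hxs))⟩
        · intro x hx
          rcases List.mem_cons.mp hx with rfl | hx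
          · simp
          · have := h3 x hx; simpa using this
        · simpa using h4

-- A's BFS, run with enough fuel from an invariant state, is monotone, sound and adjacency-closed
lemma pv_bfs_main (g : PySem.Dict String (List String)) (K : List String) (start : String)
    (hadj : ∀ u v, v ∈ g.getD u [] → v ∈ K) :
    ∀ (fuel : Nat) (q s : List String), (∀ x ∈ q, x ∈ s) → s.Nodup →
    (∀ x ∈ s, x ∈ K) → (∀ x ∈ s, Relation.ReflTransGen (pvE g) start x) →
    (∀ x ∈ s, x ∉ q → ∀ v ∈ g.getD x [], v ∈ s) →
    q.length + (K.length - s.length) ≤ fuel →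
    (∀ x ∈ s, x ∈ pvBFSA g fuel q s) ∧
    (∀ x ∈ pvBFSA g fuel q s, Relation.ReflTransGen (pvE g) start x) ∧
    (∀ x ∈ pvBFSA g fuel q s, ∀ v ∈ g.getD x [], v ∈ pvBFSA g fuel q s) := by
  intro fuel
  induction fuel with
  | zero =>
      intro q s hqs hn hK hreach hcl hfuel
      have hq : q = [] := List.eq_nil_of_length_eq_zero (by omega)
      subst hq
      exact ⟨fun x hx => hx, hreach, fun x hx v hv => hcl x hx (by simp) v hv⟩
  | succ f ih =>
      intro q s hqs hn hK hreach hcl hfuel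
      cases q with
      | nil =>
          exact ⟨fun x hx => hx, hreach, fun x hx v hv => hcl x hx (by simp) v hv⟩
      | cons node rest =>
          have hrest : ∀ x ∈ rest, x ∈ s := fun x hx => hqs x (List.mem_cons_of_mem _ hx)
          obtain ⟨d, h1, h2, h3, h4⟩ := pv_stepA_fold (g.getD node []) rest s hrest hn
          have hunfold : pvBFSA g (f + 1) (node :: rest) s = pvBFSA g f (rest ++ d) (s ++ d) := by
            simp only [pvBFSA]
            rw [h1]
          rw [hunfold]
          have hnode : node ∈ s := hqs node List.mem_cons_self
          have hK' : ∀ x ∈ s ++ d, x ∈ K := by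
            intro x hx
            rcases List.mem_append.mp hx with hx | hx
            · exact hK x hx
            · exact hadj node x (h2 x hx).1
          have hlen : (s ++ d).length ≤ K.length := pv_sub_len h4 hK'
          have hmain := ih (rest ++ d) (s ++ d)
            (by
              intro x hx
              rcases List.mem_append.mp hx with hx | hx
              · exact List.mem_append.mpr (Or.inl (hrest x hx))
              · exact List.mem_append.mpr (Or.inr hx))
            h4 hK'
            (by
              intro x hx
              rcases List.mem_append.mp hx with hx | hx
              · exact hreach x hx
              · exact (hreach node hnode).tail (h2 x hx).1)
            (by
              intro x hx hxq v hv
              rcases List.mem_append.mp hx with hx | hx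
              · by_cases hxn : x = node
                · subst hxn; exact h3 v hv
                · have hxrest : x ∉ rest := fun hr => hxq (List.mem_append.mpr (Or.inl hr))
                  have : x ∉ node :: rest := by simp [hxn, hxrest]
                  exact List.mem_append.mpr (Or.inl (hcl x hx this v hv))
              · exact absurd (List.mem_append.mpr (Or.inr hx)) hxq)
            (by
              simp only [List.length_append] at *
              simp only [List.length_cons] at hfuel
              omega)
          exact ⟨fun x hx => hmain.1 x (List.mem_append.mpr (Or.inl hx)), hmain.2.1, hmain.2.2⟩

-- A's BFS from a key computes exactly the forward-reachable set
lemma pv_bfs_char (g : PySem.Dict String (List String)) (K : List String)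
    (hadj : ∀ u v, v ∈ g.getD u [] → v ∈ K) (F : Nat) (hF : K.length ≤ F)
    (start : String) (hstart : start ∈ K) (x : String) :
    x ∈ pvBFSA g F [start] [start] ↔ Relation.ReflTransGen (pvE g) start x := by
  have hpos : 0 < K.length := List.length_pos_of_mem hstart
  obtain ⟨h1, h2, h3⟩ := pv_bfs_main g K start hadj F [start] [start]
    (fun x hx => hx) (List.nodup_singleton _)
    (fun x hx => by rwa [List.mem_singleton.mp hx])
    (fun x hx => by rw [List.mem_singleton.mp hx])
    (fun x hx hxq => absurd hx hxq)
    (by simp only [List.length_singleton]; omega)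
  constructor
  · exact h2 x
  · intro hr
    induction hr with
    | refl => exact h1 start List.mem_cons_self
    | tail _ e ihm => exact h3 _ ihm _ e

-- looking up a dict tabulated over the (distinct or not) key list K
lemma pv_getD_tab (f : String → PySem.Set String) : ∀ (K : List String) (u : String),
    (PySem.Dict.mk (K.map (fun k => (k, f k)))).getD u [] = if u ∈ K then f u else [] := by
  intro K
  induction K with
  | nil => intro u; rfl
  | cons k t ih =>
      intro u
      rw [List.map_cons, PySem.Dict.getD_eq_get?_getD, PySem.Dict.get?_mk_cons]
      by_cases h : k = u
      · subst h; simp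
      · rw [if_neg (by simp [h])]
        rw [← PySem.Dict.getD_eq_get?_getD, ih u]
        have h' : ¬(u = k) := fun e => h e.symm
        by_cases hu : u ∈ t <;> simp [hu, h', List.mem_cons]

-- Python's s.update(xs) appends exactly the new elements (with all the facts the sweeps need)
lemma pv_update_decomp (s l : List String) (hn : s.Nodup) :
    ∃ d, PySem.Set.update s l = s ++ d ∧ (∀ x ∈ d, x ∈ l) ∧
      (∀ x ∈ l, x ∈ s ++ d) ∧ (s ++ d).Nodup := by
  refine ⟨(PySem.Set.ofList l).filter (fun y => !(PySem.Set.contains s y)),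
    PySem.Set.update_eq_append_filter s l, ?_, ?_, ?_⟩
  · intro x hx
    exact (PySem.Set.mem_ofList l x).mp (List.mem_filter.mp hx).1
  · intro x hx
    by_cases hxs : x ∈ s
    · exact List.mem_append.mpr (Or.inl hxs)
    · refine List.mem_append.mpr (Or.inr (List.mem_filter.mpr ⟨(PySem.Set.mem_ofList l x).mpr hx, ?_⟩))
      simp [hxs]
  · rw [List.nodup_append]
    refine ⟨hn, List.Nodup.filter _ (PySem.Set.nodup_ofList l), ?_⟩
    intro a ha b hb hab
    have := (List.mem_filter.mp hb).2
    simp only [Bool.not_eq_true', ← Bool.not_eq_true, PySem.Set.contains_iff] at this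
    exact this (hab ▸ ha)

-- what one relaxation sweep does to the entry of a key
lemma pv_sweep_decomp (g : PySem.Dict String (List String)) (K : List String)
    (reach : PySem.Dict String (PySem.Set String)) (hnd : ∀ u ∈ K, (reach.getD u []).Nodup)
    (u : String) (hu : u ∈ K) :
    ∃ d, (pvSweepB g K reach).getD u [] = reach.getD u [] ++ d ∧
      (∀ x ∈ d, ∃ v ∈ g.getD u [], x ∈ reach.getD v []) ∧
      (∀ v ∈ g.getD u [], ∀ x ∈ reach.getD v [], x ∈ reach.getD u [] ++ d) ∧
      (reach.getD u [] ++ d).Nodup := by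
  have htab : (pvSweepB g K reach).getD u [] =
      PySem.Set.update (reach.getD u []) ((g.getD u []).flatMap (fun v => reach.getD v [])) := by
    rw [pvSweepB, pv_getD_tab, if_pos hu]
    rfl
  obtain ⟨d, h1, h2, h3, h4⟩ :=
    pv_update_decomp (reach.getD u []) ((g.getD u []).flatMap (fun v => reach.getD v [])) (hnd u hu)
  refine ⟨d, htab.trans h1, ?_, ?_, h4⟩
  · intro x hx
    exact List.mem_flatMap.mp (h2 x hx)
  · intro v hv x hx
    exact h3 x (List.mem_flatMap.mpr ⟨v, hv, hx⟩)

-- a sweep preserves B's invariant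
lemma pv_sweep_inv (g : PySem.Dict String (List String)) (K : List String)
    (hadj : ∀ u v, v ∈ g.getD u [] → v ∈ K)
    (reach : PySem.Dict String (PySem.Set String)) (hInv : pvInvB g K reach) :
    pvInvB g K (pvSweepB g K reach) := by
  intro u hu
  obtain ⟨d, h1, h2, _h3, h4⟩ := pv_sweep_decomp g K reach (fun u hu => (hInv u hu).1) u hu
  rw [h1]
  refine ⟨h4, List.mem_append.mpr (Or.inl (hInv u hu).2.1), ?_⟩
  intro x hx
  rcases List.mem_append.mp hx with hx | hx
  · exact (hInv u hu).2.2 x hx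
  · obtain ⟨v, hv, hxv⟩ := h2 x hx
    have hvK : v ∈ K := hadj u v hv
    obtain ⟨hxK, hxr⟩ := (hInv v hvK).2.2 x hxv
    exact ⟨hxK, Relation.ReflTransGen.head hv hxr⟩

-- B's iteration, given enough fuel, reaches an invariant fixpoint
lemma pv_iter_main (g : PySem.Dict String (List String)) (K : List String)
    (hadj : ∀ u v, v ∈ g.getD u [] → v ∈ K) :
    ∀ (fuel : Nat) (R : PySem.Dict String (PySem.Set String)), pvInvB g K R →
    (K.map (fun u => K.length - (R.getD u []).length)).sum + 1 ≤ fuel →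
    pvInvB g K (pvIterB g K fuel R) ∧ pvFixB g K (pvIterB g K fuel R) := by
  intro fuel
  induction fuel with
  | zero => intro R _ hfuel; omega
  | succ f ih =>
      intro R hInv hfuel
      have hnd : ∀ u ∈ K, (R.getD u []).Nodup := fun u hu => (hInv u hu).1
      by_cases htest : K.all (fun u => ((pvSweepB g K R).getD u []).length == (R.getD u []).length) = true
      · have hres : pvIterB g K (f + 1) R = R := by
          simp only [pvIterB]
          rw [if_pos htest]
        rw [hres]
        refine ⟨hInv, ?_⟩
        intro u hu v hv x hx
        obtain ⟨d, h1, _h2, h3, _h4⟩ := pv_sweep_decomp g K R hnd u hu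
        have hlen := List.all_eq_true.mp htest u hu
        rw [h1] at hlen
        have hd : d = [] := by
          have := eq_of_beq hlen
          simp only [List.length_append] at this
          exact List.eq_nil_of_length_eq_zero (by omega)
        have := h3 v hv x hx
        rw [hd] at this
        simpa using this
      · have hres : pvIterB g K (f + 1) R = pvIterB g K f (pvSweepB g K R) := by
          simp only [pvIterB]
          rw [if_neg htest]
        rw [hres]
        have hInv' := pv_sweep_inv g K hadj R hInv
        apply ih (pvSweepB g K R) hInv'
        -- the sweep strictly grew some entry, so the total deficit strictly drops
        have hle : ∀ u ∈ K, (R.getD u []).length ≤ ((pvSweepB g K R).getD u []).length := by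
          intro u hu
          obtain ⟨d, h1, _, _, _⟩ := pv_sweep_decomp g K R hnd u hu
          rw [h1]; simp
        have hub : ∀ u ∈ K, ((pvSweepB g K R).getD u []).length ≤ K.length := by
          intro u hu
          exact pv_sub_len (hInv' u hu).1 (fun x hx => ((hInv' u hu).2.2 x hx).1)
        have hfalse : K.all (fun u => ((pvSweepB g K R).getD u []).length == (R.getD u []).length) = false :=
          Bool.eq_false_iff.mpr htest
        obtain ⟨u0, hu0, hne⟩ := List.all_eq_false.mp hfalse
        have hlt : (R.getD u0 []).length < ((pvSweepB g K R).getD u0 []).length := by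
          rcases Nat.lt_or_ge (R.getD u0 []).length ((pvSweepB g K R).getD u0 []).length with h | h
          · exact h
          · exfalso
            apply hne
            have := hle u0 hu0
            have : ((pvSweepB g K R).getD u0 []).length = (R.getD u0 []).length := by omega
            simp [this]
        have hsum : ((K.map (fun u => K.length - ((pvSweepB g K R).getD u []).length)).sum)
            < (K.map (fun u => K.length - (R.getD u []).length)).sum := by
          apply List.sum_lt_sum
          · intro u hu
            have := hle u hu
            omega
          · exact ⟨u0, hu0, by have h1 := hub u0 hu0; omega⟩
        omega

-- at an invariant fixpoint, each key's entry is exactly its forward-reachable set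
lemma pv_reach_char (g : PySem.Dict String (List String)) (K : List String)
    (hadj : ∀ u v, v ∈ g.getD u [] → v ∈ K)
    (R : PySem.Dict String (PySem.Set String)) (hInv : pvInvB g K R) (hFix : pvFixB g K R)
    (u : String) (hu : u ∈ K) (x : String) :
    x ∈ R.getD u [] ↔ Relation.ReflTransGen (pvE g) u x := by
  constructor
  · intro hx; exact ((hInv u hu).2.2 x hx).2
  · intro hr
    refine Relation.ReflTransGen.head_induction_on (motive := fun a _ => a ∈ K → x ∈ R.getD a []) hr
      (fun hxK => (hInv x hxK).2.1) ?_ hu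
    intro a c e _ ihc haK
    have hcK : c ∈ K := hadj a c e
    exact hFix a haK c e x (ihc hcK)

-- the dict built from an association list keeps at most one item per pair, so at most as many keys
lemma pv_update_items_len {ν : Type} (l : List (String × ν)) :
    ∀ d : PySem.Dict String ν, ((d.update l).items.length ≤ d.items.length + l.length) := by
  induction l with
  | nil => intro d; simp [PySem.Dict.update]
  | cons p t ih =>
      intro d
      have h1 : (d.insert p.1 p.2).items.length ≤ d.items.length + 1 := by
        rw [PySem.Dict.insert]
        split <;> simp
      have h2 := ih (d.insert p.1 p.2)
      have h3 : d.update (p :: t) = (d.insert p.1 p.2).update t := by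
        simp [PySem.Dict.update]
      rw [h3]
      simp only [List.length_cons]
      omega

lemma pv_keys_len (graph : List (String × List String)) :
    (PySem.Dict.ofList graph).keys.length ≤ graph.length := by
  have := pv_update_items_len graph PySem.Dict.empty
  simp only [PySem.Dict.keys, List.length_map, PySem.Dict.ofList]
  simpa [PySem.Dict.empty] using this

-- membership in the keys of the dict built from an association list
lemma pv_mem_keys_update {ν : Type} (l : List (String × ν)) :
    ∀ (d : PySem.Dict String ν) (k : String),
      k ∈ (d.update l).keys ↔ k ∈ d.keys ∨ k ∈ l.map Prod.fst := by
  induction l with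
  | nil => intro d k; simp [PySem.Dict.update]
  | cons p t ih =>
      intro d k
      have h3 : d.update (p :: t) = (d.insert p.1 p.2).update t := by
        simp [PySem.Dict.update]
      rw [h3, ih, PySem.Dict.mem_keys_insert]
      simp [List.mem_cons]
      tauto

lemma pv_mem_keys (graph : List (String × List String)) (k : String) :
    k ∈ (PySem.Dict.ofList graph).keys ↔ k ∈ graph.map Prod.fst := by
  rw [PySem.Dict.ofList, pv_mem_keys_update]
  simp [PySem.Dict.empty, PySem.Dict.keys]

-- Pre_ gives: every adjacency entry is again a key of the graph dict
lemma pv_hadj (umis : List String) (graph : List (String × List String)) (counts : List (String × Int))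
    (hpre : Pre_get_connected_components_adjacency umis graph counts) :
    ∀ u v, v ∈ (PySem.Dict.ofList graph).getD u [] → v ∈ (PySem.Dict.ofList graph).keys := by
  intro u v hv
  rw [PySem.Dict.getD_eq_get?_getD] at hv
  cases hget : (PySem.Dict.ofList graph).get? u with
  | none => rw [hget] at hv; simp at hv
  | some a =>
      rw [hget] at hv
      simp only [Option.getD_some] at hv
      have hitem := PySem.Dict.mem_items_of_get?_eq_some _ hget
      have := (hpre (u, a) hitem).2 v hv
      exact (pv_mem_keys graph v).mpr this

-- the two outer passes agree: equal found-memberships and per-key component sets give equal outputs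
lemma pv_outer (K : List String) (P : String → Prop) (compA compB : String → List String)
    (hcomp : ∀ node, P node → ∀ x, x ∈ compA node ↔ x ∈ compB node) :
    ∀ (L : List String), (∀ x ∈ L, P x) →
    ∀ (fA fB : List String) (out : List (List String)), (∀ x, x ∈ fA ↔ x ∈ fB) →
    (L.foldl (fun (st : PySem.Set String × List (List String)) node =>
        if node ∈ st.1 then st
        else (PySem.Set.update st.1 (compA node), st.2 ++ [pvCanon K (compA node)])) (fA, out)).2
    = (L.foldl (fun (st : PySem.Set String × List (List String)) node =>
        if node ∈ st.1 then st
        else (PySem.Set.union st.1 (compB node), st.2 ++ [pvCanon K (compB node)])) (fB, out)).2 := by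
  intro L
  induction L with
  | nil => intro _ fA fB out _; rfl
  | cons node t ih =>
      intro hL fA fB out hf
      have hP : P node := hL node List.mem_cons_self
      have ht : ∀ x ∈ t, P x := fun x hx => hL x (List.mem_cons_of_mem _ hx)
      simp only [List.foldl_cons]
      by_cases h : node ∈ fA
      · rw [if_pos h, if_pos ((hf node).mp h)]
        exact ih ht fA fB out hf
      · rw [if_neg h, if_neg (fun hb => h ((hf node).mpr hb))]
        have hcanon : pvCanon K (compA node) = pvCanon K (compB node) := by
          unfold pvCanon
          exact List.filter_congr (fun k _ => by
            simp only [decide_eq_decide]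
            exact hcomp node hP k)
        rw [hcanon]
        apply ih ht
        intro x
        rw [PySem.Set.union]
        rw [PySem.Set.mem_update, PySem.Set.mem_update]
        constructor
        · rintro (hx | hx)
          · exact Or.inl ((hf x).mp hx)
          · exact Or.inr ((hcomp node hP x).mp hx)
        · rintro (hx | hx)
          · exact Or.inl ((hf x).mpr hx)
          · exact Or.inr ((hcomp node hP x).mpr hx)

-- ===== VERDICT (by name: the statement is the Claim_ definition above) =====
theorem get_connected_components_adjacency_spec : Claim_equal_get_connected_components_adjacency := by
  intro umis graph counts _hdom hpre
  unfold Spec_get_connected_components_adjacency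
  unfold get_connected_components_adjacency get_connected_components_adjacency_alt
  have hadj := pv_hadj umis graph counts hpre
  have hKg := pv_keys_len graph
  set g := PySem.Dict.ofList graph with hg
  set K := g.keys with hK
  -- B's initial dict satisfies the invariant
  have hInv0 : pvInvB g K (PySem.Dict.mk (K.map (fun u => (u, [u])))) := by
    intro u hu
    rw [show (PySem.Dict.mk (K.map (fun u => (u, [u])))).getD u [] = [u] from by
      rw [pv_getD_tab (fun u => [u]) K u, if_pos hu]]
    exact ⟨List.nodup_singleton _, List.mem_cons_self,
      fun x hx => by rw [List.mem_singleton.mp hx]; exact ⟨hu, Relation.ReflTransGen.refl⟩⟩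
  have hfuel0 : (K.map (fun u => K.length - ((PySem.Dict.mk (K.map (fun u => (u, [u])))).getD u []).length)).sum + 1
      ≤ graph.length * graph.length + 1 := by
    have hb : ∀ x ∈ K.map (fun u => K.length - ((PySem.Dict.mk (K.map (fun u => (u, [u])))).getD u []).length), x ≤ K.length := by
      intro x hx
      obtain ⟨u, _, rfl⟩ := List.mem_map.mp hx
      omega
    have := List.sum_le_card_nsmul _ K.length hb
    simp only [List.length_map, smul_eq_mul] at this
    have hKK : K.length * K.length ≤ graph.length * graph.length := Nat.mul_le_mul hKg hKg
    omega
  obtain ⟨hInvR, hFixR⟩ := pv_iter_main g K hadj (graph.length * graph.length + 1)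
    (PySem.Dict.mk (K.map (fun u => (u, [u])))) hInv0 hfuel0
  apply pv_outer K (fun node => node ∈ K)
    (fun node => pvBFSA g (graph.length + 1) [node] [node])
    (fun node => (pvIterB g K (graph.length * graph.length + 1)
      (PySem.Dict.mk (K.map (fun u => (u, [u]))))).getD node [])
    (by
      intro node hnode x
      rw [pv_bfs_char g K hadj (graph.length + 1) (by omega) node hnode x,
        pv_reach_char g K hadj _ hInvR hFixR node hnode x])
    (PySem.List.sorted K (fun x => (PySem.Dict.ofList counts).getD x 0) true)
    (fun x hx => (PySem.List.mem_sorted K _ true x).mp hx)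
    [] [] [] (fun x => Iff.rfl)
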